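-- pv_equiv track=rewrite | github.com/frostburn/gym_paneldepon | gym_paneldepon/bitboard.py | panels_from_list
-- ===== SOURCE A (Python) =====
-- def panels_from_list(stack):
--     panels = 0
--     p = 1
--     for panel in stack:
--         if panel:
--             panels |= p
--         p <<= 1
--     return panels
-- ===== SOURCE B (Python) =====
-- def panels_from_list(stack):
--     panels = 0
--     for panel in reversed(stack):
--         panels = (panels << 1) | (1 if panel else 0)
--     return panels
-- ===== Notes on version B (the rewrite author's own statement) =====
-- stated objective: alternative
-- what changed: Replaces the forward loop that maintains a moving position bit p with a Horner-style fold over the reversed list that shifts the accumulated result itself, dropping the second state variable.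
import Mathlib
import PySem

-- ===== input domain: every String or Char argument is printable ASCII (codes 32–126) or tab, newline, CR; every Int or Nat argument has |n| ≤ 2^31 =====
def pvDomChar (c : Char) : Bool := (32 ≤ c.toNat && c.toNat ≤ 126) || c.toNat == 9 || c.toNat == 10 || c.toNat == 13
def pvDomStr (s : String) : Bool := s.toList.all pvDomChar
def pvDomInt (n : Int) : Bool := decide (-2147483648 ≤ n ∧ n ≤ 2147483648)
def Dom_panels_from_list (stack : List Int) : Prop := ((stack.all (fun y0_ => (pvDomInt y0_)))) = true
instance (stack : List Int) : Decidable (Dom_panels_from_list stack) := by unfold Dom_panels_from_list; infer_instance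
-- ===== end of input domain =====

-- B replaces the forward loop with a moving position bit by a Horner-style fold
-- over the reversed list that shifts the accumulator itself (alternative decomposition).


-- ===== PORT A =====
-- for panel in stack: if panel: panels |= p; p <<= 1   (truthiness of int = ≠ 0)
def pflStepA (s : Int × Int) (panel : Int) : Int × Int :=
  (if panel ≠ 0 then PySem.Int.bor s.1 s.2 else s.1, s.2 <<< (1 : Nat))

def panels_from_list (stack : List Int) : Int :=
  (stack.foldl pflStepA (0, 1)).1

-- ===== PORT B =====
-- for panel in reversed(stack): panels = (panels << 1) | (1 if panel else 0)
def pflStepB (panels : Int) (panel : Int) : Int :=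
  PySem.Int.bor (panels <<< (1 : Nat)) (if panel ≠ 0 then 1 else 0)

def panels_from_list_alt (stack : List Int) : Int :=
  stack.reverse.foldl pflStepB 0

-- ===== PRECONDITION & SPEC =====
def Spec_panels_from_list (stack : List Int) (out : Int) : Prop := out = panels_from_list_alt stack
instance (stack : List Int) (out : Int) : Decidable (Spec_panels_from_list stack out) := by unfold Spec_panels_from_list; infer_instance

-- ===== CLAIM (what is proved, stated in full; the proofs are below) =====
def Claim_equal_panels_from_list : Prop := ∀ (stack : List Int), Dom_panels_from_list stack → Spec_panels_from_list stack (panels_from_list stack)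

-- ===== LEMMAS AND PROOFS =====

/-- The common bitmask value, as a natural number. -/
def pflVal : List Int → ℕ
  | [] => 0
  | x :: xs => (if x ≠ 0 then 1 else 0) + 2 * pflVal xs

theorem pfl_nat_lor_pow (m k : ℕ) (h : m < 2 ^ k) : m ||| 2 ^ k = m + 2 ^ k := by
  apply Nat.eq_of_testBit_eq
  intro i
  rw [Nat.testBit_lor, Nat.testBit_two_pow, Nat.add_comm]
  rcases lt_trichotomy i k with hi | hi | hi
  · rw [Nat.testBit_two_pow_add_gt hi]
    simp [Nat.ne_of_gt hi]
  · subst hi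
    rw [Nat.testBit_two_pow_add_eq, Nat.testBit_lt_two_pow h]
    simp
  · have h1 : m.testBit i = false := Nat.testBit_lt_two_pow
      (lt_of_lt_of_le h (Nat.pow_le_pow_right (by omega) (le_of_lt hi)))
    have h2 : (2 ^ k + m).testBit i = false := Nat.testBit_lt_two_pow
      (lt_of_lt_of_le (by omega : 2 ^ k + m < 2 ^ (k + 1)) (Nat.pow_le_pow_right (by omega) hi))
    simp [h1, h2, Nat.ne_of_lt hi]

theorem pfl_nat_lor_one (a : ℕ) : 2 * a ||| 1 = 2 * a + 1 := by
  apply Nat.eq_of_testBit_eq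
  intro i
  rw [Nat.testBit_lor]
  cases i with
  | zero => simp [Nat.testBit_zero]
  | succ j =>
    rw [Nat.testBit_succ, Nat.testBit_succ, Nat.testBit_succ]
    have h1 : 2 * a / 2 = a := by omega
    have h2 : (2 * a + 1) / 2 = a := by omega
    simp [h1, h2]

theorem pfl_shift_two (a : ℤ) : a <<< (1 : Nat) = 2 * a := by
  rw [Int.shiftLeft_eq']
  ring

theorem pfl_loopA (xs : List Int) : ∀ (k m : ℕ), m < 2 ^ k →
    (xs.foldl pflStepA ((m : ℤ), (2 : ℤ) ^ k)).1 = (m : ℤ) + (2 : ℤ) ^ k * (pflVal xs : ℤ) := by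
  induction xs with
  | nil => intro k m _; simp [pflVal]
  | cons x xs ih =>
    intro k m hm
    have hpow : ((2 : ℤ) ^ k) = ((2 ^ k : ℕ) : ℤ) := by push_cast; ring
    have hp : ((2 : ℤ) ^ k) <<< (1 : Nat) = (2 : ℤ) ^ (k + 1) := by
      rw [pfl_shift_two]; ring
    rw [List.foldl_cons]
    by_cases hx : x ≠ 0
    · have hlor : PySem.Int.bor (m : ℤ) ((2 : ℤ) ^ k) = (((m + 2 ^ k : ℕ)) : ℤ) := by
        rw [hpow, PySem.Int.bor_natCast, pfl_nat_lor_pow m k hm]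
      have step : pflStepA ((m : ℤ), (2 : ℤ) ^ k) x
          = ((((m + 2 ^ k : ℕ)) : ℤ), (2 : ℤ) ^ (k + 1)) := by
        unfold pflStepA
        rw [if_pos hx, hlor]
        exact congrArg _ hp
      rw [step, ih (k + 1) (m + 2 ^ k) (by rw [pow_succ]; omega)]
      simp only [pflVal, if_pos hx]
      push_cast
      ring
    · have step : pflStepA ((m : ℤ), (2 : ℤ) ^ k) x
          = ((m : ℤ), (2 : ℤ) ^ (k + 1)) := by
        unfold pflStepA
        rw [if_neg hx]
        exact congrArg _ hp
      rw [step, ih (k + 1) m (by rw [pow_succ]; omega)]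
      simp only [pflVal, if_neg hx]
      push_cast
      ring

theorem pfl_loopB (xs : List Int) :
    xs.foldr (fun x acc => pflStepB acc x) 0 = (pflVal xs : ℤ) := by
  induction xs with
  | nil => simp [pflVal]
  | cons x xs ih =>
    rw [List.foldr_cons, ih]
    unfold pflStepB
    rw [pfl_shift_two]
    have hcast : (2 : ℤ) * (pflVal xs : ℤ) = ((2 * pflVal xs : ℕ) : ℤ) := by push_cast; ring
    by_cases hx : x ≠ 0
    · rw [if_pos hx, hcast]
      have h1 : (1 : ℤ) = ((1 : ℕ) : ℤ) := rfl
      rw [h1, PySem.Int.bor_natCast, pfl_nat_lor_one]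
      simp only [pflVal, if_pos hx]
      push_cast
      ring
    · rw [if_neg hx, hcast]
      simp only [pflVal, if_neg hx]
      have h1 : (0 : ℤ) = ((0 : ℕ) : ℤ) := rfl
      rw [h1, PySem.Int.bor_natCast, Nat.or_zero]
      push_cast
      ring

-- ===== VERDICT (by name: the statement is the Claim_ definition above) =====
theorem panels_from_list_spec : Claim_equal_panels_from_list := by
  intro stack _
  unfold Spec_panels_from_list panels_from_list panels_from_list_alt
  rw [List.foldl_reverse]
  have hA := pfl_loopA stack 0 0 (by norm_num)
  have hB := pfl_loopB stack
  simp only [pow_zero, Nat.cast_zero] at hA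
  rw [hA, hB]
  ring
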